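-- pv_equiv track=rewrite | github.com/myxyy/RecursiveCompressorHF | dataset.py | _extract_turns_sharegpt
-- ===== SOURCE A (Python) =====
-- def _extract_turns_sharegpt(conversations):
--     """shi3z形式: [{from: human/gpt, value: ...}, ...]"""
--     turns = []
--     i = 0
--     while i + 1 < len(conversations):
--         if conversations[i]["from"] == "human" and conversations[i + 1]["from"] == "gpt":
--             turns.append((conversations[i]["value"], conversations[i + 1]["value"]))
--             i += 2
--         else:
--             i += 1
--     return turns
-- ===== SOURCE B (Python) =====
-- def _extract_turns_sharegpt(conversations):
--     """shi3z形式: [{from: human/gpt, value: ...}, ...]"""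
--     return [
--         (a["value"], b["value"])
--         for a, b in zip(conversations, conversations[1:])
--         if a["from"] == "human" and b["from"] == "gpt"
--     ]
-- ===== Notes on version B (the rewrite author's own statement) =====
-- stated objective: idiomatic
-- what changed: Replaces the variable-step index cursor (i+=2 on a match, i+=1 otherwise) with a fixed sliding-window comprehension over all adjacent pairs via zip(conversations, conversations[1:]); equivalent because the skipped element always has from=='gpt' and so can never start a pair.
import Mathlib
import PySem

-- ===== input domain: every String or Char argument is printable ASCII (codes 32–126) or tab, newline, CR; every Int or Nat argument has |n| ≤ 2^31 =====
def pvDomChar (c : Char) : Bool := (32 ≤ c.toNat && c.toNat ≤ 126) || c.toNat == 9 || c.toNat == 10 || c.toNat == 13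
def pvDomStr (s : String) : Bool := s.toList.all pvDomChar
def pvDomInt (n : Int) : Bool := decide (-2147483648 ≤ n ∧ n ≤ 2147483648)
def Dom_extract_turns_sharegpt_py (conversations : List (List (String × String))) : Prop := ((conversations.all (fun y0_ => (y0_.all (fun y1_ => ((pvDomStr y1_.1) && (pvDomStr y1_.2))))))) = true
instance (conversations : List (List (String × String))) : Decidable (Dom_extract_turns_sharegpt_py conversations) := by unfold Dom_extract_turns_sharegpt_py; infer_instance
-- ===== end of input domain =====

-- B replaces A's variable-step index cursor with an idiomatic sliding-window comprehension
-- over adjacent pairs; equivalence is about return values (neither program mutates its input).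

-- A dict[str, str] is an association list; d[k] is first-match lookup.  Python raises
-- KeyError when the key is absent; there the lookup defaults to "" — reachable only
-- outside Pre_, which excludes exactly the raising inputs.
def pvLk (d : List (String × String)) (k : String) : String :=
  (List.lookup k d).getD ""

-- ===== PORT A =====
-- while i + 1 < len(conversations): if match then append and i += 2 else i += 1
def pvALoop (conversations : List (List (String × String))) (i : Nat)
    (turns : List (String × String)) : List (String × String) :=
  if h : i + 1 < conversations.length then
    if pvLk conversations[i] "from" = "human" ∧ pvLk conversations[i + 1] "from" = "gpt" then
      pvALoop conversations (i + 2)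
        (turns ++ [(pvLk conversations[i] "value", pvLk conversations[i + 1] "value")])
    else
      pvALoop conversations (i + 1) turns
  else
    turns
termination_by conversations.length - i

def extract_turns_sharegpt_py (conversations : List (List (String × String))) : List (String × String) :=
  pvALoop conversations 0 []

-- ===== PORT B =====
-- [(a["value"], b["value"]) for a, b in zip(conversations, conversations[1:])
--  if a["from"] == "human" and b["from"] == "gpt"]
def extract_turns_sharegpt_py_alt (conversations : List (List (String × String))) : List (String × String) :=
  (conversations.zip (PySem.List.slice conversations (some 1) none)).filterMap
    (fun p =>
      if pvLk p.1 "from" = "human" ∧ pvLk p.2 "from" = "gpt" then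
        some (pvLk p.1 "value", pvLk p.2 "value")
      else
        none)

-- ===== PRECONDITION & SPEC =====
-- Pre_ holds exactly where Python A returns normally: for each adjacent pair, "from" is a
-- key of the first dict; if it maps to "human", "from" is a key of the second; and if that
-- maps to "gpt", both dicts carry "value".  Otherwise A (and B) raise KeyError.
def Pre_extract_turns_sharegpt_py (conversations : List (List (String × String))) : Prop :=
  ∀ p ∈ conversations.zip conversations.tail,
    (List.lookup "from" p.1).isSome = true ∧
      (pvLk p.1 "from" = "human" →
        (List.lookup "from" p.2).isSome = true ∧
          (pvLk p.2 "from" = "gpt" →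
            (List.lookup "value" p.1).isSome = true ∧ (List.lookup "value" p.2).isSome = true))
instance (conversations : List (List (String × String))) : Decidable (Pre_extract_turns_sharegpt_py conversations) := by
  unfold Pre_extract_turns_sharegpt_py; infer_instance

def pvWitness_extract_turns_sharegpt_py : (List (List (String × String))) :=
  [[("from", "human"), ("value", "hi")], [("from", "gpt"), ("value", "hello")],
   [("from", "system"), ("value", "x")]]

def Spec_extract_turns_sharegpt_py (conversations : List (List (String × String))) (out : List (String × String)) : Prop := out = extract_turns_sharegpt_py_alt conversations
instance (conversations : List (List (String × String))) (out : List (String × String)) : Decidable (Spec_extract_turns_sharegpt_py conversations out) := by unfold Spec_extract_turns_sharegpt_py; infer_instance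

-- ===== CLAIM (what is proved, stated in full; the proofs are below) =====
def Claim_equal_extract_turns_sharegpt_py : Prop := ∀ (conversations : List (List (String × String))), Dom_extract_turns_sharegpt_py conversations → Pre_extract_turns_sharegpt_py conversations → Spec_extract_turns_sharegpt_py conversations (extract_turns_sharegpt_py conversations)

-- ===== LEMMAS AND PROOFS =====

-- Structural characterisation of B's sliding-window scan.
theorem alt_cons₂ (a b : List (String × String)) (r : List (List (String × String))) :
    extract_turns_sharegpt_py_alt (a :: b :: r) =
      (if pvLk a "from" = "human" ∧ pvLk b "from" = "gpt" then
        [(pvLk a "value", pvLk b "value")] else []) ++ extract_turns_sharegpt_py_alt (b :: r) := by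
  simp only [extract_turns_sharegpt_py_alt, PySem.List.slice_from_one, List.tail_cons,
    List.zip_cons_cons, List.filterMap_cons]
  split_ifs with h <;> simp

theorem alt_short (l : List (List (String × String))) (h : l.length ≤ 1) :
    extract_turns_sharegpt_py_alt l = [] := by
  match l, h with
  | [], _ => rfl
  | [a], _ => rfl

-- B drops a leading element whose "from" is not "human".
theorem alt_skip (b : List (String × String)) (r : List (List (String × String)))
    (hb : pvLk b "from" ≠ "human") :
    extract_turns_sharegpt_py_alt (b :: r) = extract_turns_sharegpt_py_alt r := by
  cases r with
  | nil => rfl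
  | cons c r' =>
    rw [alt_cons₂]
    simp [hb]

-- Loop invariant: A's cursor loop from index i produces B's scan of the suffix.
theorem aLoop_eq (conversations : List (List (String × String))) (i : Nat)
    (turns : List (String × String)) :
    pvALoop conversations i turns = turns ++ extract_turns_sharegpt_py_alt (conversations.drop i) := by
  rw [pvALoop]
  split
  · next h =>
    have hd1 : conversations.drop i = conversations[i] :: conversations.drop (i + 1) :=
      List.drop_eq_getElem_cons (by omega)
    have hd2 : conversations.drop (i + 1) = conversations[i + 1] :: conversations.drop (i + 2) :=
      List.drop_eq_getElem_cons (by omega)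
    split
    · next hc =>
      rw [aLoop_eq, hd1, hd2, alt_cons₂,
        alt_skip _ _ (by rw [hc.2]; decide)]
      simp [hc]
    · next hc =>
      rw [aLoop_eq, hd1, hd2, alt_cons₂, ← hd2]
      simp [hc]
  · next h =>
    rw [alt_short]
    · simp
    · simp; omega
termination_by conversations.length - i

-- ===== VERDICT (by name: the statement is the Claim_ definition above) =====
theorem extract_turns_sharegpt_py_spec : Claim_equal_extract_turns_sharegpt_py := by
  intro conversations _ _
  show extract_turns_sharegpt_py conversations = extract_turns_sharegpt_py_alt conversations
  rw [extract_turns_sharegpt_py, aLoop_eq]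
  simp
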